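-- pv_equiv track=rewrite | github.com/tapparelj/gr-lora_sdr | python/lora_sdr/qa_hamm_dec.py | hamm_dec
-- ===== SOURCE A (Python) =====
-- from functools import reduce
--
-- def int_to_bool(value, num_bits):
--     return [(value >> i) & 1 for i in range(num_bits - 1, -1, -1)]
--
-- def bool_to_int(b):
--     return reduce(lambda x, y: (x << 1) + y, b, 0)
--
-- def hamm_dec(cr, in_data, is_header):
--     out_data = []
--     cr_app = 4 if is_header else cr
--
--     for i in range(len(in_data)):
--         data_nibble = [False] * 4
--         s0, s1, s2 = False, False, False
--         syndrom = 0
--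
--         codeword = int_to_bool(in_data[i], cr_app + 4)
--
--         data_nibble = [codeword[3], codeword[2], codeword[1], codeword[0]]  # reorganized msb-first
--
--         if cr_app == 4:
--             if not (sum(codeword) % 2):
--                 continue
--
--         elif cr_app == 3:
--             # get syndrom
--             s0 = codeword[0] ^ codeword[1] ^ codeword[2] ^ codeword[4]
--             s1 = codeword[1] ^ codeword[2] ^ codeword[3] ^ codeword[5]
--             s2 = codeword[0] ^ codeword[1] ^ codeword[3] ^ codeword[6]
--
--             syndrom = s0 + (s1 << 1) + (s2 << 2)
--
--             if syndrom == 5: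
--                 data_nibble[3] = not data_nibble[3]
--             elif syndrom == 7:
--                 data_nibble[2] = not data_nibble[2]
--             elif syndrom == 3:
--                 data_nibble[1] = not data_nibble[1]
--             elif syndrom == 6:
--                 data_nibble[0] = not data_nibble[0]
--
--         elif cr_app == 2:
--             s0 = codeword[0] ^ codeword[1] ^ codeword[2] ^ codeword[4]
--             s1 = codeword[1] ^ codeword[2] ^ codeword[3] ^ codeword[5]
--
--             if s0 or s1:
--                 pass
--
--         elif cr_app == 1:
--             if not (sum(codeword) % 2):
--                 pass
--
--         out_data.append(bool_to_int(data_nibble))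
--
--     return out_data
-- ===== SOURCE B (Python) =====
-- # B: decodes cr=3 by nearest-codeword search over a precomputed codebook of the
-- # 16 valid Hamming(7,4) words (minimum-distance decoding; exact because the code
-- # is perfect), and restructures the stream into per-branch filter/map
-- # comprehensions instead of one accumulating loop with per-word syndrome logic.
--
-- _CODEBOOK = []
-- for _d in range(16):
--     _b0, _b1, _b2, _b3 = _d & 1, (_d >> 1) & 1, (_d >> 2) & 1, (_d >> 3) & 1
--     _CODEBOOK.append(((_b0 << 6) | (_b1 << 5) | (_b2 << 4) | (_b3 << 3)
--                       | ((_b0 ^ _b1 ^ _b2) << 2) | ((_b1 ^ _b2 ^ _b3) << 1)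
--                       | (_b0 ^ _b1 ^ _b3), _d))
--
--
-- def _nib(v, sh):
--     u = v >> sh
--     return (u % 2) * 8 + (u // 2 % 2) * 4 + (u // 4 % 2) * 2 + u // 8 % 2
--
--
-- def _odd_parity(p):
--     p ^= p >> 4
--     p ^= p >> 2
--     p ^= p >> 1
--     return p % 2 == 1
--
--
-- def hamm_dec(cr, in_data, is_header):
--     cr_app = 4 if is_header else cr
--     if cr_app == 3:
--         # perfect code: exactly one codeword within Hamming distance 1 of v mod 128
--         return [d for v in in_data for (w, d) in _CODEBOOK
--                 if ((v % 128) ^ w) & (((v % 128) ^ w) - 1) == 0]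
--     if cr_app == 4:
--         return [_nib(v, 4) for v in in_data if _odd_parity(v % 256)]
--     return [_nib(v, cr_app) for v in in_data]
-- ===== Notes on version B (the rewrite author's own statement) =====
-- stated objective: faster
-- what changed: B replaces A's per-codeword syndrome computation and conditional bit-flip with minimum-distance decoding against a precomputed 16-entry codebook of valid Hamming(7,4) words (exact because the code is perfect), and restructures the single accumulating loop into per-branch filter/map comprehensions with divmod-arithmetic nibble extraction (no per-element boolean-list building or reduce), a constant-factor speedup.
import Mathlib
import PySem

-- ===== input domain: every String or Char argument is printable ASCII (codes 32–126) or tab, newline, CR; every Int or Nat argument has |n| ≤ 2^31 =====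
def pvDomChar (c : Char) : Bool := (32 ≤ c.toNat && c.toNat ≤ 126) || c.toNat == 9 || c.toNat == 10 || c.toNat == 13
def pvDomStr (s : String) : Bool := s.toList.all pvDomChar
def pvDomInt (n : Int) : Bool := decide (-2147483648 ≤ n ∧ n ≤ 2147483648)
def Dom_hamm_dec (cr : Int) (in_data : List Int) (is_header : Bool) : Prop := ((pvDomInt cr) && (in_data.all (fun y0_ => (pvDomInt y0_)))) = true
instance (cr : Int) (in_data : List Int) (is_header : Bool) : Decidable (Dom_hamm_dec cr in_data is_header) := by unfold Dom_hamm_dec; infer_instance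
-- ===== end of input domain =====

-- B decodes the cr=3 case by nearest-codeword search over a precomputed 16-entry
-- codebook of valid Hamming(7,4) words, and restructures the stream into
-- per-branch filter/map comprehensions instead of one accumulating loop.

-- ===== PORT A =====
-- Python `not x` on a 0/1 int, subsequently used as an int (True = 1, False = 0)
def pyNotInt (x : Int) : Int := if x == 0 then 1 else 0

-- [(value >> i) & 1 for i in range(num_bits - 1, -1, -1)]; `>>` exact: every i in this countdown range is ≥ 0
def int_to_bool (value : Int) (numBits : Int) : List Int :=
  (PySem.List.pyRange (numBits - 1) (-1) (-1)).map (fun i => PySem.Int.band (value >>> i.toNat) 1)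

-- reduce(lambda x, y: (x << 1) + y, b, 0)
def bool_to_int (b : List Int) : Int := b.foldl (fun x y => (x <<< 1) + y) 0

-- the loop body (one iteration appending to out_data, `continue` keeps out_data)
def hammBodyA (cr_app : Int) (out_data : List Int) (v : Int) : List Int :=
  let codeword := int_to_bool v (cr_app + 4)
  -- codeword[j]: in range whenever cr_app ≥ 0 (Pre_); Python raises IndexError otherwise
  let cw : Nat → Int := fun j => codeword.getD j 0
  let data_nibble : List Int := [cw 3, cw 2, cw 1, cw 0]
  if cr_app == 4 then
    if PySem.Int.mod codeword.sum 2 == 0 then out_data  -- continue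
    else out_data ++ [bool_to_int data_nibble]
  else if cr_app == 3 then
    let s0 := PySem.Int.bxor (PySem.Int.bxor (PySem.Int.bxor (cw 0) (cw 1)) (cw 2)) (cw 4)
    let s1 := PySem.Int.bxor (PySem.Int.bxor (PySem.Int.bxor (cw 1) (cw 2)) (cw 3)) (cw 5)
    let s2 := PySem.Int.bxor (PySem.Int.bxor (PySem.Int.bxor (cw 0) (cw 1)) (cw 3)) (cw 6)
    let syndrom := s0 + (s1 <<< (1:Nat)) + (s2 <<< (2:Nat))
    let d :=
      if syndrom == 5 then data_nibble.set 3 (pyNotInt (data_nibble.getD 3 0))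
      else if syndrom == 7 then data_nibble.set 2 (pyNotInt (data_nibble.getD 2 0))
      else if syndrom == 3 then data_nibble.set 1 (pyNotInt (data_nibble.getD 1 0))
      else if syndrom == 6 then data_nibble.set 0 (pyNotInt (data_nibble.getD 0 0))
      else data_nibble
    out_data ++ [bool_to_int d]
  else if cr_app == 2 then
    let _s0 := PySem.Int.bxor (PySem.Int.bxor (PySem.Int.bxor (cw 0) (cw 1)) (cw 2)) (cw 4)
    let _s1 := PySem.Int.bxor (PySem.Int.bxor (PySem.Int.bxor (cw 1) (cw 2)) (cw 3)) (cw 5)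
    out_data ++ [bool_to_int data_nibble]
  else if cr_app == 1 then
    let _p := PySem.Int.mod codeword.sum 2
    out_data ++ [bool_to_int data_nibble]
  else out_data ++ [bool_to_int data_nibble]

def hamm_dec (cr : Int) (in_data : List Int) (is_header : Bool) : List Int :=
  let cr_app : Int := if is_header then 4 else cr
  in_data.foldl (hammBodyA cr_app) []

-- ===== PORT B =====
-- module-level codebook: the 16 valid Hamming(7,4) codewords, paired with their nibble
def pvCodebook : List (Int × Int) :=
  (PySem.List.pyRange 0 16 1).foldl (fun acc d =>
    let b0 := PySem.Int.band d 1
    let b1 := PySem.Int.band (d >>> (1:Nat)) 1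
    let b2 := PySem.Int.band (d >>> (2:Nat)) 1
    let b3 := PySem.Int.band (d >>> (3:Nat)) 1
    acc ++ [(PySem.Int.bor (PySem.Int.bor (PySem.Int.bor (PySem.Int.bor
              (PySem.Int.bor (b0 <<< (6:Nat)) (b1 <<< (5:Nat))) (b2 <<< (4:Nat)))
              (b3 <<< (3:Nat)))
              ((PySem.Int.bxor (PySem.Int.bxor b0 b1) b2) <<< (2:Nat)))
              (PySem.Int.bor ((PySem.Int.bxor (PySem.Int.bxor b1 b2) b3) <<< (1:Nat))
                (PySem.Int.bxor (PySem.Int.bxor b0 b1) b3)), d)]) []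

def pvNib (v : Int) (sh : Int) : Int :=
  let u := v >>> sh.toNat  -- v >> sh: exact for sh ≥ 0 (Pre_ excludes negative cr with nonempty data)
  (PySem.Int.mod u 2) * 8 + (PySem.Int.mod (PySem.Int.floordiv u 2) 2) * 4
    + (PySem.Int.mod (PySem.Int.floordiv u 4) 2) * 2 + PySem.Int.mod (PySem.Int.floordiv u 8) 2

def pvOddParity (p : Int) : Bool :=
  -- p is always the nonnegative v % 256, so `>>` by a Nat literal is exact
  let p1 := PySem.Int.bxor p (p >>> (4:Nat))
  let p2 := PySem.Int.bxor p1 (p1 >>> (2:Nat))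
  let p3 := PySem.Int.bxor p2 (p2 >>> (1:Nat))
  PySem.Int.mod p3 2 == 1

def hamm_dec_alt (cr : Int) (in_data : List Int) (is_header : Bool) : List Int :=
  let cr_app : Int := if is_header then 4 else cr
  if cr_app == 3 then
    in_data.flatMap (fun v => pvCodebook.filterMap (fun wd =>
      let x := PySem.Int.bxor (PySem.Int.mod v 128) wd.1
      if PySem.Int.band x (x - 1) == 0 then some wd.2 else none))
  else if cr_app == 4 then
    (in_data.filter (fun v => pvOddParity (PySem.Int.mod v 256))).map (fun v => pvNib v 4)
  else
    in_data.map (fun v => pvNib v cr_app)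

-- ===== PRECONDITION & SPEC =====
-- Pre_ excludes only inputs on which A raises: with is_header False, a negative cr and a
-- nonempty in_data, codeword has fewer than 4 entries and codeword[3] raises IndexError.
def Pre_hamm_dec (cr : Int) (in_data : List Int) (is_header : Bool) : Prop :=
  is_header = true ∨ 0 ≤ cr ∨ in_data = []
instance (cr : Int) (in_data : List Int) (is_header : Bool) : Decidable (Pre_hamm_dec cr in_data is_header) := by unfold Pre_hamm_dec; infer_instance
def pvWitness_hamm_dec : Int × List Int × Bool := (3, [13, 200, 77], false)

def Spec_hamm_dec (cr : Int) (in_data : List Int) (is_header : Bool) (out : List Int) : Prop := out = hamm_dec_alt cr in_data is_header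
instance (cr : Int) (in_data : List Int) (is_header : Bool) (out : List Int) : Decidable (Spec_hamm_dec cr in_data is_header out) := by unfold Spec_hamm_dec; infer_instance

-- ===== CLAIM (what is proved, stated in full; the proofs are below) =====
def Claim_equal_hamm_dec : Prop := ∀ (cr : Int) (in_data : List Int) (is_header : Bool), Dom_hamm_dec cr in_data is_header → Pre_hamm_dec cr in_data is_header → Spec_hamm_dec cr in_data is_header (hamm_dec cr in_data is_header)

-- ===== LEMMAS AND PROOFS =====

-- every branch of A's body either keeps out_data or appends one element
theorem bodyA_split (c : Int) (out : List Int) (v : Int) :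
    hammBodyA c out v = out ++ hammBodyA c [] v := by
  simp only [hammBodyA]
  split_ifs <;> simp

theorem shiftR_nat_eq (v : Int) (k : Nat) : v >>> k = v / ((2:Int)^k) := by
  rw [Int.shiftRight_eq_div_pow]; norm_num

-- bit k of v, for k < 7, only depends on v % 128
theorem band1_mod128 (v : Int) (k : Nat) (hk : k < 7) :
    PySem.Int.band (v >>> k) 1 = PySem.Int.band ((v % 128) >>> k) 1 := by
  rw [PySem.Int.band_one, PySem.Int.band_one, shiftR_nat_eq, shiftR_nat_eq,
    PySem.Int.mod_eq_emod_of_pos (by norm_num), PySem.Int.mod_eq_emod_of_pos (by norm_num)]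
  interval_cases k <;> norm_num <;> omega

-- bit k of v, for k < 8, only depends on v % 256
theorem band1_mod256 (v : Int) (k : Nat) (hk : k < 8) :
    PySem.Int.band (v >>> k) 1 = PySem.Int.band ((v % 256) >>> k) 1 := by
  rw [PySem.Int.band_one, PySem.Int.band_one, shiftR_nat_eq, shiftR_nat_eq,
    PySem.Int.mod_eq_emod_of_pos (by norm_num), PySem.Int.mod_eq_emod_of_pos (by norm_num)]
  interval_cases k <;> norm_num <;> omega

theorem bodyA3_mod (v : Int) : hammBodyA 3 [] v = hammBodyA 3 [] (v % 128) := by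
  have hpr : PySem.List.pyRange (3+4-1) (-1) (-1) = [6,5,4,3,2,1,0] := by decide
  simp only [hammBodyA, int_to_bool, hpr, List.map_cons, List.map_nil,
    show Int.toNat 6 = 6 from rfl, show Int.toNat 5 = 5 from rfl,
    show Int.toNat 4 = 4 from rfl, show Int.toNat 3 = 3 from rfl,
    show Int.toNat 2 = 2 from rfl, show Int.toNat 1 = 1 from rfl,
    show Int.toNat 0 = 0 from rfl, Int.shiftRight_natCast_right]
  rw [band1_mod128 v 6 (by norm_num), band1_mod128 v 5 (by norm_num),
    band1_mod128 v 4 (by norm_num), band1_mod128 v 3 (by norm_num),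
    band1_mod128 v 2 (by norm_num), band1_mod128 v 1 (by norm_num),
    band1_mod128 v 0 (by norm_num)]

theorem bodyA4_mod (v : Int) : hammBodyA 4 [] v = hammBodyA 4 [] (v % 256) := by
  have hpr : PySem.List.pyRange (4+4-1) (-1) (-1) = [7,6,5,4,3,2,1,0] := by decide
  simp only [hammBodyA, int_to_bool, hpr, List.map_cons, List.map_nil,
    show Int.toNat 7 = 7 from rfl, show Int.toNat 6 = 6 from rfl,
    show Int.toNat 5 = 5 from rfl, show Int.toNat 4 = 4 from rfl,
    show Int.toNat 3 = 3 from rfl, show Int.toNat 2 = 2 from rfl,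
    show Int.toNat 1 = 1 from rfl, show Int.toNat 0 = 0 from rfl, Int.shiftRight_natCast_right]
  rw [band1_mod256 v 7 (by norm_num), band1_mod256 v 6 (by norm_num),
    band1_mod256 v 5 (by norm_num), band1_mod256 v 4 (by norm_num),
    band1_mod256 v 3 (by norm_num), band1_mod256 v 2 (by norm_num),
    band1_mod256 v 1 (by norm_num), band1_mod256 v 0 (by norm_num)]

theorem pymod_idem (v M : Int) (hM : (0:Int) < M) : PySem.Int.mod (v % M) M = PySem.Int.mod v M := by
  rw [PySem.Int.mod_eq_emod_of_pos hM, PySem.Int.mod_eq_emod_of_pos hM, Int.emod_emod_of_dvd]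
  exact dvd_refl M

theorem nib4_mod (v : Int) : pvNib (v % 256) 4 = pvNib v 4 := by
  simp only [pvNib, show Int.toNat 4 = 4 from rfl, shiftR_nat_eq,
    PySem.Int.mod_eq_emod_of_pos (show (0:Int) < 2 by norm_num),
    PySem.Int.floordiv_eq_ediv_of_pos (show (0:Int) < 2 by norm_num),
    PySem.Int.floordiv_eq_ediv_of_pos (show (0:Int) < 4 by norm_num),
    PySem.Int.floordiv_eq_ediv_of_pos (show (0:Int) < 8 by norm_num)]
  norm_num
  omega

theorem key3 : ∀ m : Int, 0 ≤ m → m < 128 →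
    hammBodyA 3 [] m = pvCodebook.filterMap (fun wd =>
      let x := PySem.Int.bxor (PySem.Int.mod m 128) wd.1
      if PySem.Int.band x (x - 1) == 0 then some wd.2 else none) := by
  intro m h0 h1
  interval_cases m <;> decide

theorem key4 : ∀ m : Int, 0 ≤ m → m < 256 →
    hammBodyA 4 [] m = (if pvOddParity (PySem.Int.mod m 256) then [pvNib m 4] else []) := by
  intro m h0 h1
  interval_cases m <;> decide

theorem elem3 (v : Int) : hammBodyA 3 [] v = pvCodebook.filterMap (fun wd =>
    let x := PySem.Int.bxor (PySem.Int.mod v 128) wd.1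
    if PySem.Int.band x (x - 1) == 0 then some wd.2 else none) := by
  rw [bodyA3_mod, key3 (v % 128) (by omega) (by omega)]
  simp only [pymod_idem v 128 (by norm_num)]

theorem elem4 (v : Int) :
    hammBodyA 4 [] v = (if pvOddParity (PySem.Int.mod v 256) then [pvNib v 4] else []) := by
  rw [bodyA4_mod, key4 (v % 256) (by omega) (by omega)]
  simp only [pymod_idem v 256 (by norm_num), nib4_mod]

-- the generic branch (cr_app ∉ {3,4}, cr_app ≥ 0): plain reversed-nibble extraction
theorem elemElse (m : Nat) (h3 : ((m:Nat):Int) ≠ 3) (h4 : ((m:Nat):Int) ≠ 4) (v : Int) :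
    hammBodyA ((m:Nat):Int) [] v = [pvNib v ((m:Nat):Int)] := by
  have hm4 : (((m:Nat):Int) == 4) = false := beq_eq_false_iff_ne.mpr h4
  have hm3 : (((m:Nat):Int) == 3) = false := beq_eq_false_iff_ne.mpr h3
  simp only [hammBodyA, int_to_bool, bool_to_int, List.foldl,
    hm4, hm3, Bool.false_eq_true, if_false, ite_self,
    PySem.List.pyRange_neg_one, List.map_map]
  have hlen : ((m:Int) + 4 - 1 - -1).toNat = m + 4 := by omega
  rw [hlen]
  rw [PySem.List.getD_map_range _ (m+4) 3 0 (by omega),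
      PySem.List.getD_map_range _ (m+4) 2 0 (by omega),
      PySem.List.getD_map_range _ (m+4) 1 0 (by omega),
      PySem.List.getD_map_range _ (m+4) 0 0 (by omega)]
  simp only [Function.comp_apply, Nat.cast_ofNat, Nat.cast_one, Nat.cast_zero, sub_zero]
  have T3 : ((m:Int) + 4 - 1 - 3).toNat = m := by omega
  have T2 : ((m:Int) + 4 - 1 - 2).toNat = m + 1 := by omega
  have T1 : ((m:Int) + 4 - 1 - 1).toNat = m + 2 := by omega
  have T0 : ((m:Int) + 4 - 1).toNat = m + 3 := by omega
  rw [T3, T2, T1, T0]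
  simp only [pvNib, Int.toNat_natCast, Int.shiftRight_natCast_right, shiftR_nat_eq,
    PySem.Int.band_one,
    PySem.Int.mod_eq_emod_of_pos (show (0:Int) < 2 by norm_num),
    PySem.Int.floordiv_eq_ediv_of_pos (show (0:Int) < 2 by norm_num),
    PySem.Int.floordiv_eq_ediv_of_pos (show (0:Int) < 4 by norm_num),
    PySem.Int.floordiv_eq_ediv_of_pos (show (0:Int) < 8 by norm_num)]
  have G1 : v / (2:Int)^(m+1) = v / 2^m / 2 := by
    rw [pow_succ, ← Int.ediv_ediv_of_nonneg (by positivity)]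
  have G2 : v / (2:Int)^(m+2) = v / 2^m / 2 / 2 := by
    rw [show m+2 = m+1+1 from rfl, pow_succ, ← Int.ediv_ediv_of_nonneg (by positivity), G1]
  have G3 : v / (2:Int)^(m+3) = v / 2^m / 2 / 2 / 2 := by
    rw [show m+3 = m+2+1 from rfl, pow_succ, ← Int.ediv_ediv_of_nonneg (by positivity), G2]
  rw [G3, G2, G1]
  generalize v / (2:Int)^m = W0
  have sl : ∀ a : Int, a <<< (1:Int) = a * 2 := fun a => by
    rw [show (1:Int) = ((1:Nat):Int) from rfl, Int.shiftLeft_natCast_right, Int.shiftLeft_eq]; norm_num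
  simp only [List.nil_append, List.cons.injEq, and_true, sl]
  have C2 : W0 / 4 = W0 / 2 / 2 := by omega
  have C3 : W0 / 8 = W0 / 2 / 2 / 2 := by omega
  rw [C2, C3]
  omega

-- xs.flatMap over "one element if p, else none" is filter-then-map
theorem flatMap_ite_singleton {α β : Type} (p : α → Bool) (f : α → β) (xs : List α) :
    xs.flatMap (fun v => if p v then [f v] else []) = (xs.filter p).map f := by
  induction xs with
  | nil => rfl
  | cons x xs ih =>
    simp only [List.flatMap_cons, List.filter_cons, ih]
    by_cases h : p x <;> simp [h]

-- the whole loop, for a fixed nonnegative cr_app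
theorem main_loop (c : Int) (hc : 0 ≤ c) (xs : List Int) :
    xs.foldl (hammBodyA c) [] =
      (if c == 3 then
        xs.flatMap (fun v => pvCodebook.filterMap (fun wd =>
          let x := PySem.Int.bxor (PySem.Int.mod v 128) wd.1
          if PySem.Int.band x (x - 1) == 0 then some wd.2 else none))
      else if c == 4 then
        (xs.filter (fun v => pvOddParity (PySem.Int.mod v 256))).map (fun v => pvNib v 4)
      else
        xs.map (fun v => pvNib v c)) := by
  have h1 : xs.foldl (hammBodyA c) [] = xs.foldl (fun acc v => acc ++ hammBodyA c [] v) [] :=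
    PySem.List.foldl_congr_mem xs (hammBodyA c) (fun acc v => acc ++ hammBodyA c [] v) []
      (fun acc x _ => bodyA_split c acc x)
  rw [h1, PySem.List.foldl_append_eq_flatMap, List.nil_append]
  by_cases h3 : c = 3
  · subst h3
    rw [if_pos (show (((3:Int) == 3) = true) from rfl)]
    rw [show (hammBodyA 3 [] : Int → List Int) = (fun v => pvCodebook.filterMap (fun wd =>
      let x := PySem.Int.bxor (PySem.Int.mod v 128) wd.1
      if PySem.Int.band x (x - 1) == 0 then some wd.2 else none)) from funext elem3]
  · by_cases h4 : c = 4
    · subst h4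
      rw [if_neg (show ¬(((4:Int) == 3) = true) from by decide),
        if_pos (show (((4:Int) == 4) = true) from rfl)]
      rw [show (hammBodyA 4 [] : Int → List Int) =
        (fun v => if pvOddParity (PySem.Int.mod v 256) then [pvNib v 4] else []) from funext elem4]
      exact flatMap_ite_singleton _ _ xs
    · rw [if_neg (show ¬((c == 3) = true) from by simp [h3]),
        if_neg (show ¬((c == 4) = true) from by simp [h4])]
      lift c to Nat using hc with m
      calc xs.flatMap (fun v => hammBodyA ((m:Nat):Int) [] v)
          = xs.flatMap (fun v => [pvNib v ((m:Nat):Int)]) := by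
            simp only [elemElse m h3 h4]
        _ = xs.map (fun v => pvNib v ((m:Nat):Int)) := by
            exact Eq.symm List.map_eq_flatMap

-- ===== VERDICT (by name: the statement is the Claim_ definition above) =====
theorem hamm_dec_spec : Claim_equal_hamm_dec := by
  intro cr xs hdr _ hpre
  unfold Spec_hamm_dec
  simp only [hamm_dec, hamm_dec_alt]
  rcases em (xs = []) with hnil | hne
  · subst hnil; simp
  · have hc : (0:Int) ≤ if hdr then 4 else cr := by
      rcases hpre with hh | hcr | h
      · subst hh; norm_num
      · split <;> omega
      · exact absurd h hne
    exact main_loop _ hc xs
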